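-- pv_equiv track=rewrite | github.com/Zenjjim/PacCar | utils.py | make_outline_loops
-- ===== SOURCE A (Python) =====
-- def make_outline_loops(outline):
--     loops = []
--
--     def find_next_point(point):
--         neighbors = [(point[0] + 1, point[1]), (point[0] - 1, point[1]), (point[0], point[1] + 1), (point[0], point[1] - 1)]
--         for i in range(len(outline)):
--             if point != outline[i] and outline[i] in neighbors:
--                 return outline.pop(i)
--
--     while outline:
--         loop = []
--         first = outline.pop(0)
--         loop.append(first)
--         while True:
--             next_point = find_next_point(loop[-1])
--             if next_point:
--                 loop.append(next_point)
--             else: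
--                 break
--         loops.append(loop)
--     return loops
-- ===== SOURCE B (Python) =====
-- # Return-value equivalent to A; note A consumes its argument (pops it empty) while B leaves it intact.
-- def make_outline_loops(outline):
--     # occurrence indices of each point, in DECREASING order: the smallest
--     # remaining index of a point is lst[-1], and removing it is an O(1) pop.
--     idx = {}
--     for i, p in reversed(list(enumerate(outline))):
--         idx.setdefault(p, []).append(i)
--     loops = []
--     for start, p in enumerate(outline):
--         lst = idx.get(p)
--         if not lst or lst[-1] != start:
--             continue  # this occurrence was already consumed by an earlier loop
--         lst.pop()
--         loop = [p]
--         while True: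
--             x, y = loop[-1]
--             best = None
--             bq = None
--             for q in ((x + 1, y), (x - 1, y), (x, y + 1), (x, y - 1)):
--                 l = idx.get(q)
--                 if l and (best is None or l[-1] < best):
--                     best = l[-1]
--                     bq = q
--             if best is None:
--                 break
--             idx[bq].pop()
--             loop.append(bq)
--         loops.append(loop)
--     return loops
-- ===== Notes on version B (the rewrite author's own statement) =====
-- stated objective: faster
-- what changed: Replaces A's linear rescan of the remaining outline per chain step (inside destructive pops) with a one-time hash index from point to its occurrence indices: each step probes the 4 neighbor coordinates and takes the minimum remaining index, removing it in O(1).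
import Mathlib
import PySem

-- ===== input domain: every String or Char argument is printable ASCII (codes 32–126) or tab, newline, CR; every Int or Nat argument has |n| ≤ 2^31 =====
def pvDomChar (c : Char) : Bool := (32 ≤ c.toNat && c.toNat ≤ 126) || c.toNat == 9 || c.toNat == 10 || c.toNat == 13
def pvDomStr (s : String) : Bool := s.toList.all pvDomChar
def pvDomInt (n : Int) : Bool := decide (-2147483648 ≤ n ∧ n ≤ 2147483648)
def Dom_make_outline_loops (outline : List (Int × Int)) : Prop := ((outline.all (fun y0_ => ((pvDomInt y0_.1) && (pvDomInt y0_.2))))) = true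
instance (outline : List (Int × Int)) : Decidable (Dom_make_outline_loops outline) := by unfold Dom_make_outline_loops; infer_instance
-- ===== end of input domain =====

-- B replaces A's repeated linear rescans of the shrinking outline by a one-time hash index from
-- point to occurrence indices, probing only the 4 neighbour coordinates per step (measured faster).
-- Equivalence is about the RETURN value: the Python A empties its argument list in place, B does not mutate it.

-- ===== PORT A =====

-- the `neighbors` list of find_next_point
def pvNbrsA (p : Int × Int) : List (Int × Int) :=
  [(p.1 + 1, p.2), (p.1 - 1, p.2), (p.1, p.2 + 1), (p.1, p.2 - 1)]

-- find_next_point: scan the remaining outline left to right; pop and return the first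
-- element that is ≠ point and a neighbour of point (none = Python's implicit None)
def pvFnp (point : Int × Int) : List (Int × Int) → Option ((Int × Int) × List (Int × Int))
  | [] => none
  | q :: rest =>
    if point ≠ q ∧ q ∈ pvNbrsA point then some (q, rest)
    else
      match pvFnp point rest with
      | none => none
      | some (r, rest') => some (r, q :: rest')

-- the inner `while True` loop: `loop` is kept reversed in acc, loop[-1] is `last`;
-- fuel (= length of the remaining outline) only makes the recursion structural: every
-- executed step pops one element, so it never runs out
def pvBuild (fuel : Nat) (last : Int × Int) (acc : List (Int × Int))
    (rem : List (Int × Int)) : List (Int × Int) × List (Int × Int) :=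
  match fuel with
  | 0 => (acc.reverse, rem)
  | fuel + 1 =>
    match pvFnp last rem with
    | none => (acc.reverse, rem)
    | some (q, rest) => pvBuild fuel q (q :: acc) rest

-- the outer `while outline` loop (same fuel device: one element is popped per iteration)
def pvOuterA (fuel : Nat) (rem : List (Int × Int)) : List (List (Int × Int)) :=
  match fuel with
  | 0 => []
  | fuel + 1 =>
    match rem with
    | [] => []
    | p :: rest =>
      let r := pvBuild rest.length p [p] rest
      r.1 :: pvOuterA fuel r.2

def make_outline_loops (outline : List (Int × Int)) : List (List (Int × Int)) :=
  pvOuterA outline.length outline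

-- ===== PORT B =====

-- the tuple of 4 neighbour coordinates probed by B
def pvNbrsB (p : Int × Int) : List (Int × Int) :=
  [(p.1 + 1, p.2), (p.1 - 1, p.2), (p.1, p.2 + 1), (p.1, p.2 - 1)]

-- idx: point -> its occurrence indices in decreasing order (the reversed-enumerate loop)
def pvIdx (outline : List (Int × Int)) : PySem.Dict (Int × Int) (List Nat) :=
  outline.zipIdx.reverse.foldl (fun d pi => d.modify pi.1 [] (fun l => l ++ [pi.2])) PySem.Dict.empty

-- one iteration of `for q in (…4 neighbours…)`: keep the smallest candidate index and its point
def pvBestFold (d : PySem.Dict (Int × Int) (List Nat)) (st : Option (Nat × (Int × Int)))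
    (q : Int × Int) : Option (Nat × (Int × Int)) :=
  match d.get? q with
  | none => st
  | some [] => st
  | some (a :: t) =>
    match st with
    | none => some ((a :: t).getLast (by simp), q)
    | some (best, bq) =>
      if (a :: t).getLast (by simp) < best then some ((a :: t).getLast (by simp), q)
      else some (best, bq)

def pvBest (d : PySem.Dict (Int × Int) (List Nat)) (p : Int × Int) :
    Option (Nat × (Int × Int)) :=
  (pvNbrsB p).foldl (pvBestFold d) none

-- the inner `while True` loop; fuel (= len(outline)) only makes the recursion structural,
-- every executed step removes one index from idx so it never runs out on reachable states
def pvChainB (fuel : Nat) (d : PySem.Dict (Int × Int) (List Nat)) (last : Int × Int)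
    (acc : List (Int × Int)) : List (Int × Int) × PySem.Dict (Int × Int) (List Nat) :=
  match fuel with
  | 0 => (acc.reverse, d)
  | fuel + 1 =>
    match pvBest d last with
    | none => (acc.reverse, d)
    | some (_, bq) => pvChainB fuel (d.modify bq [] List.dropLast) bq (bq :: acc)

-- body of `for start, p in enumerate(outline)` (pi = (p, start))
def pvStep (n : Nat) (st : PySem.Dict (Int × Int) (List Nat) × List (List (Int × Int)))
    (pi : (Int × Int) × Nat) : PySem.Dict (Int × Int) (List Nat) × List (List (Int × Int)) :=
  match st.1.get? pi.1 with
  | none => st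
  | some [] => st
  | some (a :: t) =>
    if (a :: t).getLast (by simp) = pi.2 then
      let d1 := st.1.modify pi.1 [] List.dropLast
      let r := pvChainB n d1 pi.1 [pi.1]
      (r.2, st.2 ++ [r.1])
    else st

def make_outline_loops_alt (outline : List (Int × Int)) : List (List (Int × Int)) :=
  (outline.zipIdx.foldl (pvStep outline.length) (pvIdx outline, [])).2

-- ===== PRECONDITION & SPEC =====
def Spec_make_outline_loops (outline : List (Int × Int)) (out : List (List (Int × Int))) : Prop := out = make_outline_loops_alt outline
instance (outline : List (Int × Int)) (out : List (List (Int × Int))) : Decidable (Spec_make_outline_loops outline out) := by unfold Spec_make_outline_loops; infer_instance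

-- ===== CLAIM (what is proved, stated in full; the proofs are below) =====
def Claim_equal_make_outline_loops : Prop := ∀ (outline : List (Int × Int)), Dom_make_outline_loops outline → Spec_make_outline_loops outline (make_outline_loops outline)

-- ===== LEMMAS AND PROOFS =====

-- ---- proof-side model: the greedy chain algorithm over alive-index lists ----

def pvFget (o : List (Int × Int)) (i : Nat) : Int × Int := o.getD i (0, 0)

def pvAFind (o : List (Int × Int)) (p : Int × Int) (S : List Nat) : Option Nat :=
  S.find? (fun i => decide (pvFget o i ∈ pvNbrsA p))

def pvMChain (o : List (Int × Int)) (p : Int × Int) (acc : List (Int × Int)) (S : List Nat) :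
    List (Int × Int) × List Nat :=
  match h : pvAFind o p S with
  | none => (acc.reverse, S)
  | some j => pvMChain o (pvFget o j) (pvFget o j :: acc) (S.erase j)
termination_by S.length
decreasing_by
  have hj : j ∈ S := List.mem_of_find?_eq_some h
  have h1 := List.length_erase_of_mem hj
  have h2 := List.length_pos_of_mem hj
  omega

theorem pvMChain_sublist (o : List (Int × Int)) :
    ∀ (p : Int × Int) (acc : List (Int × Int)) (S : List Nat),
      (pvMChain o p acc S).2.Sublist S := by
  intro p acc S
  fun_induction pvMChain o p acc S with
  | case1 p acc S h => exact List.Sublist.refl _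
  | case2 p acc S j h ih => exact ih.trans (List.erase_sublist ..)

def pvMOuter (o : List (Int × Int)) (S : List Nat) : List (List (Int × Int)) :=
  match S with
  | [] => []
  | j :: S' =>
    let r := pvMChain o (pvFget o j) [pvFget o j] S'
    r.1 :: pvMOuter o r.2
termination_by S.length
decreasing_by
  have := (pvMChain_sublist o (pvFget o j) [pvFget o j] S').length_le
  simpa using Nat.lt_succ_of_le this

-- the alive-indices invariant relating B's dict to the model state
def pvInv (o : List (Int × Int)) (S : List Nat) (d : PySem.Dict (Int × Int) (List Nat)) : Prop :=
  ∀ q, d.getD q [] = (S.filter (fun i => decide (pvFget o i = q))).reverse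

-- goodness of the running best/bq accumulator of B's neighbour fold
def pvGood (o : List (Int × Int)) (S : List Nat) (seen : List (Int × Int)) :
    Option (Nat × (Int × Int)) → Prop
  | none => ∀ i ∈ S, pvFget o i ∉ seen
  | some (b, bq) => b ∈ S ∧ pvFget o b = bq ∧ bq ∈ seen ∧ ∀ i ∈ S, pvFget o i ∈ seen → b ≤ i

-- ---- unfolding equations for the well-founded model definitions ----

theorem pvMChain_eq_none {o : List (Int × Int)} {p : Int × Int} {acc : List (Int × Int)}
    {S : List Nat} (h : pvAFind o p S = none) : pvMChain o p acc S = (acc.reverse, S) := by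
  conv_lhs => rw [pvMChain.eq_def]
  split
  · rfl
  · next j heq => rw [h] at heq; cases heq

theorem pvMChain_eq_some {o : List (Int × Int)} {p : Int × Int} {acc : List (Int × Int)}
    {S : List Nat} {j : Nat} (h : pvAFind o p S = some j) :
    pvMChain o p acc S = pvMChain o (pvFget o j) (pvFget o j :: acc) (S.erase j) := by
  conv_lhs => rw [pvMChain.eq_def]
  split
  · next heq => rw [h] at heq; cases heq
  · next j' heq =>
    rw [h] at heq
    injection heq with heq
    subst heq
    rfl

theorem pvMOuter_nil (o : List (Int × Int)) : pvMOuter o [] = [] := by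
  rw [pvMOuter.eq_def]

theorem pvMOuter_cons (o : List (Int × Int)) (j : Nat) (S' : List Nat) :
    pvMOuter o (j :: S') =
      (pvMChain o (pvFget o j) [pvFget o j] S').1 ::
        pvMOuter o (pvMChain o (pvFget o j) [pvFget o j] S').2 := by
  conv_lhs => rw [pvMOuter.eq_def]

-- ---- generic facts ----

theorem pvNbrsA_ne {p q : Int × Int} (h : q ∈ pvNbrsA p) : p ≠ q := by
  intro hc
  subst hc
  simp [pvNbrsA, Prod.ext_iff] at h
  omega

theorem pvHead_le {a : Nat} {l : List Nat} (hs : (a :: l).Pairwise (· < ·)) :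
    ∀ x ∈ a :: l, a ≤ x := by
  intro x hx
  rcases List.mem_cons.mp hx with rfl | hx
  · exact Nat.le_refl x
  · exact Nat.le_of_lt ((List.pairwise_cons.mp hs).1 x hx)

theorem pvNodup_of_sorted {S : List Nat} (hs : S.Pairwise (· < ·)) : S.Nodup :=
  hs.imp (fun h => Nat.ne_of_lt h)

theorem pvFind_sorted_min {S : List Nat} {P : Nat → Bool} {b : Nat}
    (hs : S.Pairwise (· < ·)) (hb : b ∈ S) (hPb : P b = true)
    (hmin : ∀ i ∈ S, P i = true → b ≤ i) : S.find? P = some b := by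
  induction S with
  | nil => cases hb
  | cons a t ih =>
    cases hPa : P a with
    | true =>
      have h1 : b ≤ a := hmin a List.mem_cons_self hPa
      have h2 : a ≤ b := pvHead_le hs b hb
      have hab : a = b := Nat.le_antisymm h2 h1
      subst hab
      simp only [List.find?_cons, hPa]
    | false =>
      have hbt : b ∈ t := by
        rcases List.mem_cons.mp hb with rfl | h
        · rw [hPa] at hPb; cases hPb
        · exact h
      simp only [List.find?_cons, hPa]
      exact ih (List.pairwise_cons.mp hs).2 hbt
        (fun i hi hPi => hmin i (List.mem_cons_of_mem _ hi) hPi)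

theorem pvFind_min_of_sorted {S : List Nat} {P : Nat → Bool} {j : Nat}
    (hs : S.Pairwise (· < ·)) (hf : S.find? P = some j) :
    ∀ i ∈ S, P i = true → j ≤ i := by
  induction S with
  | nil => cases hf
  | cons a t ih =>
    intro i hi hPi
    rcases List.mem_cons.mp hi with rfl | hit
    · rw [List.find?_cons, hPi] at hf
      simp at hf
      omega
    · cases hPa : P a with
      | true =>
        rw [List.find?_cons, hPa] at hf
        simp at hf
        subst hf
        exact pvHead_le hs i (List.mem_cons_of_mem _ hit)
      | false =>
        rw [List.find?_cons, hPa] at hf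
        exact ih (List.pairwise_cons.mp hs).2 hf i hit hPi

theorem pvFilter_erase {S : List Nat} (hnd : S.Nodup) (P : Nat → Bool) (b : Nat) :
    (S.erase b).filter P = (S.filter P).erase b := by
  induction S with
  | nil => simp
  | cons a t ih =>
    rcases List.nodup_cons.mp hnd with ⟨hat, hndt⟩
    by_cases hab : a = b
    · subst hab
      rw [List.erase_cons_head]
      cases hPa : P a with
      | true =>
        rw [List.filter_cons_of_pos hPa, List.erase_cons_head]
      | false =>
        rw [List.filter_cons_of_neg (by simp [hPa])]
        rw [List.erase_of_not_mem (fun hc => hat (List.mem_of_mem_filter hc))]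
    · have hba : ¬((a : Nat) == b) := by simp [hab]
      rw [List.erase_cons_tail hba]
      cases hPa : P a with
      | true =>
        rw [List.filter_cons_of_pos hPa, List.filter_cons_of_pos hPa,
          List.erase_cons_tail hba, ih hndt]
      | false =>
        rw [List.filter_cons_of_neg (by simp [hPa]), List.filter_cons_of_neg (by simp [hPa]),
          ih hndt]

theorem pvFilter_head_min {S : List Nat} {P : Nat → Bool} {b : Nat}
    (hs : S.Pairwise (· < ·)) (hb : b ∈ S) (hPb : P b = true)
    (hmin : ∀ i ∈ S, P i = true → b ≤ i) :
    S.filter P = b :: (S.erase b).filter P := by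
  rw [pvFilter_erase (pvNodup_of_sorted hs)]
  have hbf : b ∈ S.filter P := List.mem_filter.mpr ⟨hb, hPb⟩
  cases hf : S.filter P with
  | nil => rw [hf] at hbf; cases hbf
  | cons c r =>
    have hsf : (S.filter P).Pairwise (· < ·) := hs.filter P
    rw [hf] at hsf hbf
    have hcf : c ∈ S.filter P := by rw [hf]; exact List.mem_cons_self
    have hcP := List.mem_filter.mp hcf
    have hbc : b ≤ c := hmin c hcP.1 hcP.2
    have hcb : c ≤ b := pvHead_le hsf b hbf
    have hcbe : c = b := Nat.le_antisymm hcb hbc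
    subst hcbe
    rw [List.erase_cons_head]

theorem pvFilter_erase_of_ne {S : List Nat} {Q : Nat → Bool} {b : Nat}
    (hs : S.Pairwise (· < ·)) (hQb : Q b = false) :
    (S.erase b).filter Q = S.filter Q := by
  rw [pvFilter_erase (pvNodup_of_sorted hs)]
  apply List.erase_of_not_mem
  simp [List.mem_filter, hQb]

theorem pvGetLast_eq {α : Type} {l r : List α} {a : α} (h : l = r ++ [a]) (hne : l ≠ []) :
    l.getLast hne = a := by
  subst h
  exact List.getLast_concat

theorem pvSorted_head_min {S : List Nat} {t : Nat} (hs : S.Pairwise (· < ·))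
    (ht : t ∈ S) (hmin : ∀ i ∈ S, t ≤ i) : S = t :: S.erase t := by
  cases S with
  | nil => cases ht
  | cons a T =>
    have hat : a = t := by
      rcases List.mem_cons.mp ht with h | h
      · exact h.symm
      · have h1 := hmin a List.mem_cons_self
        have h2 := (List.pairwise_cons.mp hs).1 t h
        omega
    subst hat
    rw [List.erase_cons_head]

theorem pvGet?_of_getD_ne {d : PySem.Dict (Int × Int) (List Nat)} {k : Int × Int}
    {v : List Nat} (h : d.getD k [] = v) (hne : v ≠ []) : d.get? k = some v := by
  rw [PySem.Dict.getD_eq_get?_getD] at h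
  cases hg : d.get? k with
  | none => rw [hg] at h; simp at h; exact (hne h).elim
  | some w => rw [hg] at h; simp at h; rw [h]

-- evaluation equations for B's step functions
theorem pvBestFold_none {d : PySem.Dict (Int × Int) (List Nat)} {st : Option (Nat × (Int × Int))}
    {q : Int × Int} (h : d.get? q = none) : pvBestFold d st q = st := by
  unfold pvBestFold; rw [h]

theorem pvBestFold_nil {d : PySem.Dict (Int × Int) (List Nat)} {st : Option (Nat × (Int × Int))}
    {q : Int × Int} (h : d.get? q = some []) : pvBestFold d st q = st := by
  unfold pvBestFold; rw [h]

theorem pvBestFold_cons {d : PySem.Dict (Int × Int) (List Nat)} {st : Option (Nat × (Int × Int))}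
    {q : Int × Int} {a : Nat} {t : List Nat} (h : d.get? q = some (a :: t)) :
    pvBestFold d st q =
      match st with
      | none => some ((a :: t).getLast (by simp), q)
      | some (best, bq) =>
        if (a :: t).getLast (by simp) < best then some ((a :: t).getLast (by simp), q)
        else some (best, bq) := by
  unfold pvBestFold; rw [h]

theorem pvStep_none {n : Nat} {st : PySem.Dict (Int × Int) (List Nat) × List (List (Int × Int))}
    {pi : (Int × Int) × Nat} (h : st.1.get? pi.1 = none) : pvStep n st pi = st := by
  unfold pvStep; rw [h]

theorem pvStep_nil {n : Nat} {st : PySem.Dict (Int × Int) (List Nat) × List (List (Int × Int))}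
    {pi : (Int × Int) × Nat} (h : st.1.get? pi.1 = some []) : pvStep n st pi = st := by
  unfold pvStep; rw [h]

theorem pvStep_cons {n : Nat} {st : PySem.Dict (Int × Int) (List Nat) × List (List (Int × Int))}
    {pi : (Int × Int) × Nat} {a : Nat} {t : List Nat} (h : st.1.get? pi.1 = some (a :: t)) :
    pvStep n st pi =
      if (a :: t).getLast (by simp) = pi.2 then
        ((pvChainB n (st.1.modify pi.1 [] List.dropLast) pi.1 [pi.1]).2,
          st.2 ++ [(pvChainB n (st.1.modify pi.1 [] List.dropLast) pi.1 [pi.1]).1])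
      else st := by
  unfold pvStep; rw [h]

-- ---- A-side: the port computes the model ----

theorem pvFnp_map (o : List (Int × Int)) (p : Int × Int) :
    ∀ (S : List Nat),
      pvFnp p (S.map (pvFget o)) =
        match pvAFind o p S with
        | none => none
        | some j => some (pvFget o j, (S.erase j).map (pvFget o)) := by
  intro S
  induction S with
  | nil => simp [pvFnp, pvAFind]
  | cons i t ih =>
    by_cases hPi : pvFget o i ∈ pvNbrsA p
    · have hne : p ≠ pvFget o i := pvNbrsA_ne hPi
      have h1 : pvAFind o p (i :: t) = some i := by
        simp [pvAFind, hPi]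
      rw [h1]
      simp only [List.map_cons, pvFnp]
      rw [if_pos ⟨hne, hPi⟩, List.erase_cons_head]
    · have h1 : pvAFind o p (i :: t) = pvAFind o p t := by
        simp only [pvAFind, List.find?_cons, hPi, decide_false]
      rw [h1]
      simp only [List.map_cons, pvFnp]
      rw [if_neg (fun hc => hPi hc.2), ih]
      cases hft : pvAFind o p t with
      | none => simp
      | some j =>
        have hj : pvFget o j ∈ pvNbrsA p := by
          have := List.find?_some hft
          simpa using this
        have hij : ¬((i : Nat) == j) := by
          simp only [beq_iff_eq]
          intro hc
          rw [hc] at hPi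
          exact hPi hj
        simp only [List.erase_cons_tail hij, List.map_cons]

theorem pvBuild_mchain (o : List (Int × Int)) :
    ∀ (fuel : Nat) (S : List Nat) (last : Int × Int) (acc : List (Int × Int)),
      S.length ≤ fuel →
      pvBuild fuel last acc (S.map (pvFget o)) =
        ((pvMChain o last acc S).1, (pvMChain o last acc S).2.map (pvFget o)) := by
  intro fuel
  induction fuel with
  | zero =>
    intro S last acc hlen
    have hS : S = [] := List.eq_nil_of_length_eq_zero (Nat.le_zero.mp hlen)
    subst hS
    rw [pvMChain_eq_none rfl]
    rfl
  | succ fuel ih =>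
    intro S last acc hlen
    cases hfind : pvAFind o last S with
    | none =>
      rw [pvMChain_eq_none hfind]
      show (match pvFnp last (S.map (pvFget o)) with
        | none => (acc.reverse, S.map (pvFget o))
        | some (q, rest) => pvBuild fuel q (q :: acc) rest) = _
      rw [pvFnp_map, hfind]
    | some j =>
      have hj : j ∈ S := List.mem_of_find?_eq_some hfind
      have hlen' : (S.erase j).length ≤ fuel := by
        have h1 := List.length_erase_of_mem hj
        have h2 := List.length_pos_of_mem hj
        omega
      rw [pvMChain_eq_some hfind]
      show (match pvFnp last (S.map (pvFget o)) with
        | none => (acc.reverse, S.map (pvFget o))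
        | some (q, rest) => pvBuild fuel q (q :: acc) rest) = _
      rw [pvFnp_map, hfind]
      exact ih (S.erase j) (pvFget o j) (pvFget o j :: acc) hlen'

theorem pvOuterA_mouter (o : List (Int × Int)) :
    ∀ (fuel : Nat) (S : List Nat), S.length ≤ fuel →
      pvOuterA fuel (S.map (pvFget o)) = pvMOuter o S := by
  intro fuel
  induction fuel with
  | zero =>
    intro S hlen
    have hS : S = [] := List.eq_nil_of_length_eq_zero (Nat.le_zero.mp hlen)
    subst hS
    rw [pvMOuter_nil]
    rfl
  | succ fuel ih =>
    intro S hlen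
    cases S with
    | nil => rw [pvMOuter_nil]; rfl
    | cons j S' =>
      rw [pvMOuter_cons]
      show (pvBuild (S'.map (pvFget o)).length (pvFget o j) [pvFget o j]
            (S'.map (pvFget o))).1 ::
          pvOuterA fuel (pvBuild (S'.map (pvFget o)).length (pvFget o j) [pvFget o j]
            (S'.map (pvFget o))).2 = _
      rw [pvBuild_mchain o (S'.map (pvFget o)).length S' (pvFget o j) [pvFget o j]
        (by simp)]
      have hsub := pvMChain_sublist o (pvFget o j) [pvFget o j] S'
      have hlen' : (pvMChain o (pvFget o j) [pvFget o j] S').2.length ≤ fuel := by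
        have := hsub.length_le
        simp at hlen
        omega
      exact congrArg₂ _ rfl (ih _ hlen')

theorem pvSelf_map_range (o : List (Int × Int)) :
    o = (List.range o.length).map (pvFget o) := by
  refine List.ext_getElem (by simp) ?_
  intro i h1 h2
  simp [pvFget, List.getD_eq_getElem?_getD, List.getElem?_eq_getElem h1]

-- ---- B-side: the port computes the model under the invariant ----

theorem pvZipIdx_eq (o : List (Int × Int)) :
    o.zipIdx = (List.range o.length).map (fun i => (pvFget o i, i)) := by
  refine List.ext_getElem (by simp) ?_
  intro i h1 h2
  have h3 : i < o.length := by simpa using h1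
  simp [pvFget, List.getElem_zipIdx, List.getD_eq_getElem?_getD, List.getElem?_eq_getElem h3]

theorem pvBeq_eq_decide (a b : Int × Int) : (a == b) = decide (a = b) := by
  by_cases h : a = b <;> simp [h]

theorem pvInv_init (o : List (Int × Int)) : pvInv o (List.range o.length) (pvIdx o) := by
  intro q
  show (pvIdx o).getD q [] = _
  unfold pvIdx
  rw [PySem.Dict.getD_foldl_modify_append]
  rw [pvZipIdx_eq, List.filter_reverse, List.map_reverse]
  rw [PySem.Dict.getD_empty, List.nil_append]
  congr 1
  rw [List.filter_map]
  rw [List.map_map]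
  have hp : ((fun (pi : (Int × Int) × Nat) => pi.1 == q) ∘ (fun i => (pvFget o i, i))) =
      (fun i => decide (pvFget o i = q)) := by
    funext i
    simp [Function.comp, pvBeq_eq_decide]
  rw [hp]
  have hm : ((fun (pi : (Int × Int) × Nat) => pi.2) ∘ (fun i => (pvFget o i, i))) = id := by
    funext i; rfl
  rw [hm, List.map_id]

theorem pvBestFold_good (o : List (Int × Int)) {S : List Nat}
    {d : PySem.Dict (Int × Int) (List Nat)} (hinv : pvInv o S d) (hs : S.Pairwise (· < ·))
    {st : Option (Nat × (Int × Int))} {seen : List (Int × Int)} (q : Int × Int)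
    (hg : pvGood o S seen st) : pvGood o S (seen ++ [q]) (pvBestFold d st q) := by
  have hq := hinv q
  rw [PySem.Dict.getD_eq_get?_getD] at hq
  have hskipgood : S.filter (fun i => decide (pvFget o i = q)) = [] →
      pvGood o S (seen ++ [q]) st := by
    intro hfe
    have hempty : ∀ i ∈ S, pvFget o i ≠ q := by
      intro i hi hc
      have hmem : i ∈ S.filter (fun k => decide (pvFget o k = q)) :=
        List.mem_filter.mpr ⟨hi, by simp [hc]⟩
      rw [hfe] at hmem
      cases hmem
    cases st with
    | none =>
      intro i hi hmem
      rcases List.mem_append.mp hmem with h | h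
      · exact hg i hi h
      · exact hempty i hi (by simpa using h)
    | some bp =>
      obtain ⟨b, bq⟩ := bp
      obtain ⟨h1, h2, h3, h4⟩ := hg
      refine ⟨h1, h2, List.mem_append_left _ h3, ?_⟩
      intro i hi hmem
      rcases List.mem_append.mp hmem with h | h
      · exact h4 i hi h
      · exact absurd (by simpa using h) (hempty i hi)
  cases hget : d.get? q with
  | none =>
    rw [pvBestFold_none hget]
    rw [hget] at hq
    exact hskipgood (by simpa using hq.symm)
  | some l =>
    rw [hget] at hq
    cases l with
    | nil =>
      rw [pvBestFold_nil hget]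
      exact hskipgood (by simpa using hq.symm)
    | cons a t' =>
      rw [pvBestFold_cons hget]
      have hq' : a :: t' = (S.filter (fun i => decide (pvFget o i = q))).reverse := by
        simpa using hq
      obtain ⟨mh, mt, hm⟩ : ∃ mh mt, S.filter (fun i => decide (pvFget o i = q)) = mh :: mt := by
        cases hc : S.filter (fun i => decide (pvFget o i = q)) with
        | nil => rw [hc] at hq'; simp at hq'
        | cons x xs => exact ⟨x, xs, rfl⟩
      have hlast : (a :: t').getLast (by simp) = mh :=
        pvGetLast_eq (r := mt.reverse) (by rw [hq', hm, List.reverse_cons]) _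
      have hmhm : mh ∈ S.filter (fun i => decide (pvFget o i = q)) := by
        rw [hm]; exact List.mem_cons_self
      have hmhS : mh ∈ S := (List.mem_filter.mp hmhm).1
      have hmhq : pvFget o mh = q := by
        simpa using (List.mem_filter.mp hmhm).2
      have hmin : ∀ i ∈ S, pvFget o i = q → mh ≤ i := by
        intro i hi hqi
        have him : i ∈ S.filter (fun k => decide (pvFget o k = q)) :=
          List.mem_filter.mpr ⟨hi, by simp [hqi]⟩
        have hsm := hs.filter (fun k => decide (pvFget o k = q))
        rw [hm] at him hsm
        exact pvHead_le hsm i him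
      cases st with
      | none =>
        rw [hlast]
        refine ⟨hmhS, hmhq, List.mem_append_right _ List.mem_cons_self, ?_⟩
        intro i hi hmem
        rcases List.mem_append.mp hmem with h | h
        · exact absurd h (hg i hi)
        · exact hmin i hi (by simpa using h)
      | some bp =>
        obtain ⟨b, bq⟩ := bp
        obtain ⟨h1, h2, h3, h4⟩ := hg
        rw [hlast]
        change pvGood o S (seen ++ [q]) (if mh < b then some (mh, q) else some (b, bq))
        by_cases hlt : mh < b
        · rw [if_pos hlt]
          refine ⟨hmhS, hmhq, List.mem_append_right _ List.mem_cons_self, ?_⟩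
          intro i hi hmem
          rcases List.mem_append.mp hmem with h | h
          · exact Nat.le_of_lt (Nat.lt_of_lt_of_le hlt (h4 i hi h))
          · exact hmin i hi (by simpa using h)
        · rw [if_neg hlt]
          refine ⟨h1, h2, List.mem_append_left _ h3, ?_⟩
          intro i hi hmem
          rcases List.mem_append.mp hmem with h | h
          · exact h4 i hi h
          · exact Nat.le_trans (Nat.le_of_not_lt hlt) (hmin i hi (by simpa using h))

theorem pvBest_good (o : List (Int × Int)) {S : List Nat}
    {d : PySem.Dict (Int × Int) (List Nat)} (hinv : pvInv o S d) (hs : S.Pairwise (· < ·))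
    (p : Int × Int) : pvGood o S (pvNbrsA p) (pvBest d p) := by
  have hgen : ∀ (qs : List (Int × Int)) (seen : List (Int × Int))
      (st : Option (Nat × (Int × Int))), pvGood o S seen st →
      pvGood o S (seen ++ qs) (qs.foldl (pvBestFold d) st) := by
    intro qs
    induction qs with
    | nil => intro seen st h; simpa using h
    | cons q qs ih =>
      intro seen st h
      have h1 := pvBestFold_good o hinv hs q h
      have h2 := ih (seen ++ [q]) _ h1
      simpa [List.append_assoc] using h2
  have h0 : pvGood o S [] none := by
    intro i hi h
    simp at h
  have hres := hgen (pvNbrsB p) [] none h0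
  have hBA : pvNbrsB p = pvNbrsA p := rfl
  rw [hBA] at hres
  simpa [pvBest, hBA] using hres

theorem pvBest_eq (o : List (Int × Int)) {S : List Nat}
    {d : PySem.Dict (Int × Int) (List Nat)} (hinv : pvInv o S d) (hs : S.Pairwise (· < ·))
    (p : Int × Int) :
    pvBest d p =
      match pvAFind o p S with
      | none => none
      | some j => some (j, pvFget o j) := by
  have hg := pvBest_good o hinv hs p
  cases hbest : pvBest d p with
  | none =>
    rw [hbest] at hg
    have hfind : pvAFind o p S = none := by
      apply List.find?_eq_none.mpr
      intro i hi hc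
      exact hg i hi (by simpa using hc)
    rw [hfind]
  | some bp =>
    obtain ⟨b, bq⟩ := bp
    rw [hbest] at hg
    obtain ⟨h1, h2, h3, h4⟩ := hg
    have hfind : pvAFind o p S = some b := by
      apply pvFind_sorted_min hs h1
      · simp [h2, h3]
      · intro i hi hPi
        exact h4 i hi (by simpa using hPi)
    rw [hfind]
    simp [h2]

theorem pvInv_step (o : List (Int × Int)) {S : List Nat}
    {d : PySem.Dict (Int × Int) (List Nat)} (hinv : pvInv o S d)
    (hs : S.Pairwise (· < ·)) {j : Nat}
    (hj : j ∈ S) (hmin : ∀ i ∈ S, pvFget o i = pvFget o j → j ≤ i) :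
    pvInv o (S.erase j) (d.modify (pvFget o j) [] List.dropLast) := by
  intro r
  rw [PySem.Dict.getD_modify]
  by_cases hrq : r = pvFget o j
  · rw [if_pos hrq, hinv (pvFget o j), hrq]
    have hfe : S.filter (fun i => decide (pvFget o i = pvFget o j)) =
        j :: (S.erase j).filter (fun i => decide (pvFget o i = pvFget o j)) := by
      apply pvFilter_head_min hs hj (by simp)
      intro i hi hPi
      exact hmin i hi (by simpa using hPi)
    rw [hfe, List.reverse_cons, List.dropLast_concat]
  · rw [if_neg hrq, hinv r]
    congr 1
    have hQ : (fun i => decide (pvFget o i = r)) j = false := by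
      simp only [decide_eq_false_iff_not]
      exact fun hc => hrq hc.symm
    exact (pvFilter_erase_of_ne hs hQ).symm

theorem pvChainB_sim (o : List (Int × Int)) :
    ∀ (fuel : Nat) (S : List Nat) (d : PySem.Dict (Int × Int) (List Nat))
      (last : Int × Int) (acc : List (Int × Int)),
      pvInv o S d → S.Pairwise (· < ·) → S.length ≤ fuel →
      (pvChainB fuel d last acc).1 = (pvMChain o last acc S).1 ∧
        pvInv o (pvMChain o last acc S).2 (pvChainB fuel d last acc).2 := by
  intro fuel
  induction fuel with
  | zero =>
    intro S d last acc hinv hs hlen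
    have hS : S = [] := List.eq_nil_of_length_eq_zero (Nat.le_zero.mp hlen)
    subst hS
    have hfind : pvAFind o last ([] : List Nat) = none := rfl
    rw [pvMChain_eq_none hfind]
    exact ⟨rfl, hinv⟩
  | succ fuel ih =>
    intro S d last acc hinv hs hlen
    have hbest := pvBest_eq o hinv hs last
    cases hfind : pvAFind o last S with
    | none =>
      rw [hfind] at hbest
      rw [pvMChain_eq_none hfind]
      have hcb : pvChainB (fuel + 1) d last acc = (acc.reverse, d) := by
        simp [pvChainB, hbest]
      rw [hcb]
      exact ⟨rfl, hinv⟩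
    | some j =>
      rw [hfind] at hbest
      have hj : j ∈ S := List.mem_of_find?_eq_some hfind
      have hjn : pvFget o j ∈ pvNbrsA last := by
        simpa using List.find?_some hfind
      have hminN := pvFind_min_of_sorted hs hfind
      have hminq : ∀ i ∈ S, pvFget o i = pvFget o j → j ≤ i := by
        intro i hi he
        exact hminN i hi (by simp [he, hjn])
      have hinv' := pvInv_step o hinv hs hj hminq
      have hs' : (S.erase j).Pairwise (· < ·) := List.Pairwise.sublist (List.erase_sublist ..) hs
      have hlen' : (S.erase j).length ≤ fuel := by
        have h1 := List.length_erase_of_mem hj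
        have h2 := List.length_pos_of_mem hj
        omega
      have hstep := ih (S.erase j) (d.modify (pvFget o j) [] List.dropLast)
        (pvFget o j) (pvFget o j :: acc) hinv' hs' hlen'
      have hcb : pvChainB (fuel + 1) d last acc =
          pvChainB fuel (d.modify (pvFget o j) [] List.dropLast) (pvFget o j)
            (pvFget o j :: acc) := by
        simp [pvChainB, hbest]
      rw [pvMChain_eq_some hfind, hcb]
      exact hstep

theorem pvOuter_sim (o : List (Int × Int)) :
    ∀ (len t : Nat) (S : List Nat) (d : PySem.Dict (Int × Int) (List Nat))
      (acc : List (List (Int × Int))),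
      pvInv o S d → S.Pairwise (· < ·) → S.length ≤ o.length →
      (∀ i ∈ S, t ≤ i ∧ i < t + len) →
      (((List.range' t len).map (fun i => (pvFget o i, i))).foldl (pvStep o.length) (d, acc)).2 =
        acc ++ pvMOuter o S := by
  intro len
  induction len with
  | zero =>
    intro t S d acc hinv hs hlen hb
    have hS : S = [] := by
      cases S with
      | nil => rfl
      | cons a T =>
        have := hb a List.mem_cons_self
        omega
    subst hS
    simp [pvMOuter_nil]
  | succ len ih =>
    intro t S d acc hinv hs hlen hb
    rw [List.range'_succ, List.map_cons, List.foldl_cons]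
    by_cases htS : t ∈ S
    · have hminS : ∀ i ∈ S, t ≤ i := fun i hi => (hb i hi).1
      have hdec := pvSorted_head_min hs htS hminS
      have hfe : S.filter (fun i => decide (pvFget o i = pvFget o t)) =
          t :: (S.erase t).filter (fun i => decide (pvFget o i = pvFget o t)) := by
        apply pvFilter_head_min hs htS (by simp)
        intro i hi _
        exact hminS i hi
      have hgd : d.getD (pvFget o t) [] =
          ((S.erase t).filter (fun i => decide (pvFget o i = pvFget o t))).reverse ++ [t] := by
        rw [hinv (pvFget o t), hfe, List.reverse_cons]
      have hget : d.get? (pvFget o t) =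
          some (((S.erase t).filter (fun i => decide (pvFget o i = pvFget o t))).reverse ++ [t]) :=
        pvGet?_of_getD_ne hgd (by simp)
      have hminq : ∀ i ∈ S, pvFget o i = pvFget o t → t ≤ i := fun i hi _ => hminS i hi
      have hinv1 := pvInv_step o hinv hs htS hminq
      have hs1 : (S.erase t).Pairwise (· < ·) := List.Pairwise.sublist (List.erase_sublist ..) hs
      have hlen1 : (S.erase t).length ≤ o.length := by
        have := (List.erase_sublist (a := t) (l := S)).length_le
        omega
      have hchain := pvChainB_sim o o.length (S.erase t)
        (d.modify (pvFget o t) [] List.dropLast) (pvFget o t) [pvFget o t] hinv1 hs1 hlen1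
      have hstep : pvStep o.length (d, acc) (pvFget o t, t) =
          ((pvChainB o.length (d.modify (pvFget o t) [] List.dropLast) (pvFget o t)
              [pvFget o t]).2,
            acc ++ [(pvChainB o.length (d.modify (pvFget o t) [] List.dropLast) (pvFget o t)
              [pvFget o t]).1]) := by
        obtain ⟨a, t', hv⟩ : ∃ a t',
            ((S.erase t).filter (fun i => decide (pvFget o i = pvFget o t))).reverse ++ [t] =
              a :: t' := by
          cases hc : ((S.erase t).filter
              (fun i => decide (pvFget o i = pvFget o t))).reverse ++ [t] with
          | nil => simp at hc
          | cons x xs => exact ⟨x, xs, rfl⟩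
        have hlastv : (a :: t').getLast (by simp) = t := pvGetLast_eq hv.symm _
        rw [hv] at hget
        rw [pvStep_cons hget, hlastv, if_pos rfl]
      rw [hstep]
      set mc := pvMChain o (pvFget o t) [pvFget o t] (S.erase t) with hmc
      have hsub : mc.2.Sublist (S.erase t) :=
        pvMChain_sublist o (pvFget o t) [pvFget o t] (S.erase t)
      have hrec := ih (t + 1) mc.2
        (pvChainB o.length (d.modify (pvFget o t) [] List.dropLast) (pvFget o t)
          [pvFget o t]).2
        (acc ++ [(pvChainB o.length (d.modify (pvFget o t) [] List.dropLast) (pvFget o t)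
          [pvFget o t]).1])
        hchain.2 (List.Pairwise.sublist (hsub.trans (List.erase_sublist ..)) hs)
        (Nat.le_trans (Nat.le_trans hsub.length_le (List.erase_sublist ..).length_le) hlen)
        ?_
      · rw [hrec, hchain.1]
        rw [hdec, pvMOuter_cons]
        simp [← hmc]
      · intro i hi
        have hiS' : i ∈ S.erase t := hsub.subset hi
        have hiS : i ∈ S := (List.erase_sublist ..).subset hiS'
        have hb1 := hb i hiS
        have hgt : t < i := by
          have hne : t ∉ S.erase t := by
            rw [hdec] at hs
            intro hc
            exact Nat.lt_irrefl t ((List.pairwise_cons.mp hs).1 t hc)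
          have : i ≠ t := fun hc => hne (hc ▸ hiS')
          omega
        omega
    · have hskip : pvStep o.length (d, acc) (pvFget o t, t) = (d, acc) := by
        have hq := hinv (pvFget o t)
        rw [PySem.Dict.getD_eq_get?_getD] at hq
        cases hget : d.get? (pvFget o t) with
        | none => exact pvStep_none hget
        | some l =>
          rw [hget] at hq
          cases l with
          | nil => exact pvStep_nil hget
          | cons a t' =>
            have hq' : a :: t' =
                (S.filter (fun i => decide (pvFget o i = pvFget o t))).reverse := by
              simpa using hq
            obtain ⟨mh, mt, hm⟩ : ∃ mh mt,
                S.filter (fun i => decide (pvFget o i = pvFget o t)) = mh :: mt := by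
              cases hc : S.filter (fun i => decide (pvFget o i = pvFget o t)) with
              | nil => rw [hc] at hq'; simp at hq'
              | cons x xs => exact ⟨x, xs, rfl⟩
            have hlast : (a :: t').getLast (by simp) = mh :=
              pvGetLast_eq (r := mt.reverse) (by rw [hq', hm, List.reverse_cons]) _
            have hmhm : mh ∈ S.filter (fun i => decide (pvFget o i = pvFget o t)) := by
              rw [hm]; exact List.mem_cons_self
            have hmhS : mh ∈ S := (List.mem_filter.mp hmhm).1
            have hne : mh ≠ t := fun hc => htS (hc ▸ hmhS)
            rw [pvStep_cons hget, hlast, if_neg (by simpa using hne)]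
      rw [hskip]
      apply ih (t + 1) S d acc hinv hs hlen
      intro i hi
      have hb1 := hb i hi
      have : i ≠ t := fun hc => htS (hc ▸ hi)
      omega

-- ===== VERDICT (by name: the statement is the Claim_ definition above) =====
theorem make_outline_loops_spec : Claim_equal_make_outline_loops := by
  intro o _
  show make_outline_loops o = make_outline_loops_alt o
  have hA : make_outline_loops o = pvMOuter o (List.range o.length) := by
    show pvOuterA o.length o = _
    conv_lhs => rw [pvSelf_map_range o]
    exact pvOuterA_mouter o _ _ (by simp)
  have hB : make_outline_loops_alt o = pvMOuter o (List.range o.length) := by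
    show (o.zipIdx.foldl (pvStep o.length) (pvIdx o, [])).2 = _
    rw [pvZipIdx_eq o, List.range_eq_range']
    have hsim := pvOuter_sim o o.length 0 (List.range o.length) (pvIdx o) []
      (pvInv_init o) List.pairwise_lt_range (by simp)
      (fun i hi => ⟨Nat.zero_le _, by simpa using hi⟩)
    rw [List.range_eq_range'] at hsim
    simpa using hsim
  rw [hA, hB]
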